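-- pv_equiv track=rewrite | github.com/Smazle/Thesis-Authorship-Verification | src/comparrative_methods/machine_learning/svm_author.py | analyse_header
-- ===== SOURCE A (Python) =====
-- def analyse_header(header):
--     change_indices = []
--     prev = None
--     columns = 0
--     for i, value in enumerate(header.rstrip().split(';')):
--         columns = columns + 1
--         if prev != value:
--             change_indices.append(i)
--             prev = value
--
--     feature_classes = {}
--     for (start, end) in zip(change_indices, change_indices[1:]):
--         feature_classes[start] = list(range(start, end))
--
--     return feature_classes
-- ===== SOURCE B (Python) =====
-- def analyse_header(header):
--     feature_classes = {}
--     prev = None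
--     run_start = 0
--     for i, value in enumerate(header.rstrip().split(';')):
--         if value != prev:
--             if prev is not None:
--                 feature_classes[run_start] = list(range(run_start, i))
--             run_start = i
--             prev = value
--     return feature_classes
-- ===== Notes on version B (the rewrite author's own statement) =====
-- stated objective: simpler
-- what changed: B replaces A's two-pass scheme (collect change indices, then zip consecutive pairs into ranges) with a single forward pass that tracks the current run's start and emits each completed run directly, never materialising the change_indices list.
import Mathlib
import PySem

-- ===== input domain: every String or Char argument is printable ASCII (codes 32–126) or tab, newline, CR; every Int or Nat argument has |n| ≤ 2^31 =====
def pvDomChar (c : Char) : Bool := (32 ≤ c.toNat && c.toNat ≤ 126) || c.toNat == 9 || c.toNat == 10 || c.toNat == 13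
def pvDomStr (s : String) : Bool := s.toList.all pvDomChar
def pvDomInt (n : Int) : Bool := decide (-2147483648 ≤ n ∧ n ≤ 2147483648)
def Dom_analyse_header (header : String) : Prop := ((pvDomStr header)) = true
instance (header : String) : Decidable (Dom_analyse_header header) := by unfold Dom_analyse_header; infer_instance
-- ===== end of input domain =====

-- B replaces A's two passes (collect change indices, then zip consecutive pairs into ranges)
-- with one forward pass emitting each completed run directly; objective: simpler.

-- ===== PORT A =====
-- step of A's first loop: state (change_indices, prev, columns)
def pvStepA (st : List Int × Option String × Int) (iv : Int × String) :
    List Int × Option String × Int :=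
  let cols := st.2.2 + 1
  if st.2.1 ≠ some iv.2 then (st.1 ++ [iv.1], some iv.2, cols) else (st.1, st.2.1, cols)

-- step of A's second loop: feature_classes[start] = list(range(start, end))
def pvStepA2 (d : PySem.Dict Int (List Int)) (p : Int × Int) : PySem.Dict Int (List Int) :=
  d.insert p.1 (PySem.List.pyRange p.1 p.2 1)

def analyse_header (header : String) : List (Int × List Int) :=
  let parts := (PySem.Str.split? (PySem.Str.rstrip header) ";").getD []
  let st := (PySem.List.enumerate parts 0).foldl pvStepA ([], none, 0)
  let ci := st.1
  let fc := (ci.zip (PySem.List.slice ci (some 1) none)).foldl pvStepA2 PySem.Dict.empty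
  fc.items

-- ===== PORT B =====
-- step of B's single loop: state (feature_classes, prev, run_start)
def pvStepB (st : PySem.Dict Int (List Int) × Option String × Int) (iv : Int × String) :
    PySem.Dict Int (List Int) × Option String × Int :=
  if some iv.2 ≠ st.2.1 then
    match st.2.1 with
    | none => (st.1, some iv.2, iv.1)
    | some _ => (st.1.insert st.2.2 (PySem.List.pyRange st.2.2 iv.1 1), some iv.2, iv.1)
  else st

def analyse_header_alt (header : String) : List (Int × List Int) :=
  let parts := (PySem.Str.split? (PySem.Str.rstrip header) ";").getD []
  let st := (PySem.List.enumerate parts 0).foldl pvStepB (PySem.Dict.empty, none, 0)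
  st.1.items

-- ===== PRECONDITION & SPEC =====
def Spec_analyse_header (header : String) (out : List (Int × List Int)) : Prop := out = analyse_header_alt header
instance (header : String) (out : List (Int × List Int)) : Decidable (Spec_analyse_header header out) := by unfold Spec_analyse_header; infer_instance

-- ===== CLAIM (what is proved, stated in full; the proofs are below) =====
def Claim_equal_analyse_header : Prop := ∀ (header : String), Dom_analyse_header header → Spec_analyse_header header (analyse_header header)

-- ===== LEMMAS AND PROOFS =====

-- dictionary built by A's second loop from a pair list, starting from d
def pvMkD (d : PySem.Dict Int (List Int)) (ps : List (Int × Int)) : PySem.Dict Int (List Int) :=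
  ps.foldl pvStepA2 d

lemma pvZipTailConcat (l : List Int) (a y : Int) (h : l.getLast? = some a) :
    (l ++ [y]).zip ((l ++ [y]).tail) = l.zip l.tail ++ [(a, y)] := by
  induction l with
  | nil => simp at h
  | cons b t ih =>
    cases t with
    | nil => simp_all
    | cons c u =>
      have h' : (c :: u).getLast? = some a := by
        simpa [List.getLast?_cons_cons] using h
      have := ih h'
      simp only [List.cons_append, List.zip_cons_cons, List.tail_cons] at *
      rw [← List.cons_append]
      exact congrArg _ this

-- invariant tying A's first-loop state to B's state
def pvInv (ci : List Int) (prev : Option String) (d : PySem.Dict Int (List Int)) (rs : Int) : Prop :=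
  match prev with
  | none => ci = [] ∧ d = PySem.Dict.empty
  | some _ => ci.getLast? = some rs ∧ d = pvMkD PySem.Dict.empty (ci.zip ci.tail)

lemma pvLoopInv (parts : List String) (s : Int) (ci : List Int) (prev : Option String)
    (cols : Int) (d : PySem.Dict Int (List Int)) (rs : Int) (hinv : pvInv ci prev d rs) :
    ((PySem.List.enumerate parts s).foldl pvStepB (d, prev, rs)).1 =
      pvMkD PySem.Dict.empty
        (let ci' := ((PySem.List.enumerate parts s).foldl pvStepA (ci, prev, cols)).1
         ci'.zip ci'.tail) := by
  induction parts generalizing s ci prev cols d rs with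
  | nil =>
    unfold pvInv at hinv
    cases prev with
    | none => simp [PySem.List.enumerate_nil, hinv.1, hinv.2, pvMkD]
    | some v => simp [PySem.List.enumerate_nil, hinv.2]
  | cons x xs ih =>
    rw [PySem.List.enumerate_cons]
    simp only [List.foldl_cons]
    cases prev with
    | none =>
      obtain ⟨hci, hd⟩ := hinv
      subst hci hd
      have hA : pvStepA (([] : List Int), none, cols) (s, x) = ([s], some x, cols + 1) := by
        simp [pvStepA]
      have hB : pvStepB (PySem.Dict.empty, none, rs) (s, x) = (PySem.Dict.empty, some x, s) := by
        simp [pvStepB]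
      rw [hA, hB]
      exact ih (s + 1) [s] (some x) (cols + 1) PySem.Dict.empty s (by simp [pvInv, pvMkD])
    | some v =>
      obtain ⟨hlast, hd⟩ := hinv
      by_cases hvx : v = x
      · have hA : pvStepA (ci, some v, cols) (s, x) = (ci, some v, cols + 1) := by
          simp [pvStepA, hvx]
        have hB : pvStepB (d, some v, rs) (s, x) = (d, some v, rs) := by
          simp [pvStepB, hvx]
        rw [hA, hB]
        subst hvx
        exact ih (s + 1) ci (some v) (cols + 1) d rs ⟨hlast, hd⟩
      · have hA : pvStepA (ci, some v, cols) (s, x) = (ci ++ [s], some x, cols + 1) := by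
          simp [pvStepA, hvx]
        have hB : pvStepB (d, some v, rs) (s, x) =
            (d.insert rs (PySem.List.pyRange rs s 1), some x, s) := by
          simp [pvStepB, Ne.symm hvx]
        rw [hA, hB]
        refine ih (s + 1) (ci ++ [s]) (some x) (cols + 1) _ s ?_
        refine ⟨by simp, ?_⟩
        rw [pvZipTailConcat ci rs s hlast]
        simp [pvMkD, pvStepA2, hd]

lemma pvSliceTail (ci : List Int) : PySem.List.slice ci (some 1) none = ci.tail :=
  PySem.List.slice_from_one ci

-- ===== VERDICT (by name: the statement is the Claim_ definition above) =====
theorem analyse_header_spec : Claim_equal_analyse_header := by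
  intro header _
  unfold Spec_analyse_header analyse_header analyse_header_alt
  simp only [pvSliceTail]
  rw [pvLoopInv ((PySem.Str.split? (PySem.Str.rstrip header) ";").getD []) 0 [] none 0
      PySem.Dict.empty 0 (by simp [pvInv])]
  rfl
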